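-- pv_equiv track=rewrite | github.com/mihoubmessaoud-dotcom/SEC_SYSTEM3_ENHANCED | tools/batch_investor_gate.py | _is_transient_fetch_error
-- ===== SOURCE A (Python) =====
-- def _is_transient_fetch_error(msg):
--     m = str(msg or "").lower()
--     transient_tokens = (
--         "503",
--         "service unavailable",
--         "read timed out",
--         "timeout",
--         "temporarily unavailable",
--         "connection reset",
--         "connection aborted",
--         "remote end closed connection",
--         "max retries exceeded",
--         "429",
--     )
--     return any(tok in m for tok in transient_tokens)
-- ===== SOURCE B (Python) =====
-- def _is_transient_fetch_error(msg):
--     # Single left-to-right pass over the message: at each position, test whether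
--     # any transient token starts there, instead of one full substring scan per token.
--     m = str(msg or "").lower()
--     transient_tokens = (
--         "503",
--         "service unavailable",
--         "read timed out",
--         "timeout",
--         "temporarily unavailable",
--         "connection reset",
--         "connection aborted",
--         "remote end closed connection",
--         "max retries exceeded",
--         "429",
--     )
--     for i in range(len(m) + 1):
--         for tok in transient_tokens:
--             if m.startswith(tok, i):
--                 return True
--     return False
-- ===== Notes on version B (the rewrite author's own statement) =====
-- stated objective: alternative
-- what changed: Replaces the k independent full-string substring scans (any(tok in m ...)) by a single left-to-right pass over the message that tests each position once for a token starting there.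
import Mathlib
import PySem

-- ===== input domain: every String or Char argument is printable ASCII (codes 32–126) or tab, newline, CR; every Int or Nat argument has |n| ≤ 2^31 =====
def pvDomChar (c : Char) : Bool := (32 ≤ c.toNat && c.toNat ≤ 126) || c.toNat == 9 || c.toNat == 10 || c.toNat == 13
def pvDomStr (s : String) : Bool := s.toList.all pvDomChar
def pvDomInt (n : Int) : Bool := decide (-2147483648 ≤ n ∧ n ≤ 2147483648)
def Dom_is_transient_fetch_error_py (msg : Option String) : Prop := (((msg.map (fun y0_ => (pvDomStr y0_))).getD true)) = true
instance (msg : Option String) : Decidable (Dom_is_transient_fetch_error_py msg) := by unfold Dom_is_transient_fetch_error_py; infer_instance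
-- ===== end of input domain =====

-- B replaces A's per-token full-string substring scans by one left-to-right pass
-- testing each position for a token starting there (alternative, same cost).

-- the transient_tokens tuple, shared verbatim by both Pythons
def pvTransientTokens : List String :=
  ["503", "service unavailable", "read timed out", "timeout",
   "temporarily unavailable", "connection reset", "connection aborted",
   "remote end closed connection", "max retries exceeded", "429"]

-- ===== PORT A =====
-- m = str(msg or "").lower(); return any(tok in m for tok in transient_tokens)
-- (msg or "" : for msg = None or "" the result is ""; both are Option.getD "" here)
def is_transient_fetch_error_py (msg : Option String) : Bool :=
  let m := PySem.Str.lower (msg.getD "")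
  pvTransientTokens.any (fun tok => PySem.Str.isIn tok m)

-- ===== PORT B =====
-- for i in range(len(m)+1): if m.startswith(tok, i) for some tok: return True — ported as
-- structural recursion over the successive suffixes of m (m.startswith(tok, i) = startswith (m.drop i) tok, exact for 0 ≤ i ≤ len(m))
def pvScanB : List Char → Bool
  | [] => pvTransientTokens.any (fun tok => PySem.Chars.startswith [] tok.toList)
  | c :: rest =>
      if pvTransientTokens.any (fun tok => PySem.Chars.startswith (c :: rest) tok.toList) then true
      else pvScanB rest

def is_transient_fetch_error_py_alt (msg : Option String) : Bool :=
  let m := PySem.Str.lower (msg.getD "")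
  pvScanB m.toList

-- ===== PRECONDITION & SPEC =====
def Spec_is_transient_fetch_error_py (msg : Option String) (out : Bool) : Prop := out = is_transient_fetch_error_py_alt msg
instance (msg : Option String) (out : Bool) : Decidable (Spec_is_transient_fetch_error_py msg out) := by unfold Spec_is_transient_fetch_error_py; infer_instance

-- ===== CLAIM (what is proved, stated in full; the proofs are below) =====
def Claim_equal_is_transient_fetch_error_py : Prop := ∀ (msg : Option String), Dom_is_transient_fetch_error_py msg → Spec_is_transient_fetch_error_py msg (is_transient_fetch_error_py msg)

-- ===== LEMMAS AND PROOFS =====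

-- B's position scan finds exactly the tokens occurring as an infix of s
lemma pvScanB_iff (s : List Char) :
    pvScanB s = true ↔ ∃ tok ∈ pvTransientTokens, tok.toList <:+: s := by
  induction s with
  | nil =>
      simp [pvScanB, PySem.Chars.startswith_iff, List.prefix_nil, List.infix_nil]
  | cons c rest ih =>
      simp only [pvScanB]
      split_ifs with h
      · simp only [true_iff]
        rcases List.any_eq_true.mp h with ⟨tok, htok, hpre⟩
        exact ⟨tok, htok, ((PySem.Chars.startswith_iff _ _).mp hpre).isInfix⟩
      · rw [ih]
        constructor
        · rintro ⟨tok, htok, hinf⟩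
          exact ⟨tok, htok, hinf.trans (List.infix_cons (List.infix_refl rest))⟩
        · rintro ⟨tok, htok, hinf⟩
          rcases (List.infix_cons_iff).mp hinf with hpre | hinf'
          · exact absurd (List.any_eq_true.mpr
              ⟨tok, htok, (PySem.Chars.startswith_iff _ _).mpr hpre⟩) h
          · exact ⟨tok, htok, hinf'⟩

-- ===== VERDICT (by name: the statement is the Claim_ definition above) =====
theorem is_transient_fetch_error_py_spec : Claim_equal_is_transient_fetch_error_py := by
  intro msg _
  unfold Spec_is_transient_fetch_error_py is_transient_fetch_error_py is_transient_fetch_error_py_alt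
  rw [Bool.eq_iff_iff, List.any_eq_true, pvScanB_iff]
  constructor
  · rintro ⟨tok, htok, hin⟩
    exact ⟨tok, htok, by simpa using (PySem.Chars.isIn_iff_infix _ _).mp (by simpa using hin)⟩
  · rintro ⟨tok, htok, hinf⟩
    exact ⟨tok, htok, by simpa using (PySem.Chars.isIn_iff_infix _ _).mpr hinf⟩
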